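-- pv_equiv track=rewrite | github.com/sohnryang/csed273 | hw4/validate_carry_lookahead.py | carry_4th_gatelevel
-- ===== SOURCE A (Python) =====
-- from typing import NamedTuple
--
-- class AdderInput(NamedTuple):
--     a: list[int]
--     b: list[int]
--     c_in: int
--
-- def carry_4th_gatelevel(adder_input: AdderInput) -> int:
--     a, b, c_in = adder_input
--     gen = [x and y for x, y in zip(a, b)]
--     prop = [x ^ y for x, y in zip(a, b)]
--     return (
--         gen[3]
--         or prop[3]
--         and gen[2]
--         or prop[3]
--         and prop[2]
--         and gen[1]
--         or prop[3]
--         and prop[2]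
--         and prop[1]
--         and gen[0]
--         or prop[3]
--         and prop[2]
--         and prop[1]
--         and prop[0]
--         and c_in
--     )
-- ===== SOURCE B (Python) =====
-- def carry_4th_gatelevel(adder_input):
--     a, b, c_in = adder_input
--     carry = c_in
--     for i in range(4):
--         carry = (a[i] and b[i]) or ((a[i] ^ b[i]) and carry)
--     return carry
-- ===== Notes on version B (the rewrite author's own statement) =====
-- stated objective: faster
-- what changed: Replaces the flat unrolled 4-term carry-lookahead or/and expression (which first builds full gen/prop lists over the whole inputs) with an iterative ripple-carry accumulation carry = (a[i] and b[i]) or ((a[i]^b[i]) and carry) over range(4), touching only the first four elements.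
import Mathlib
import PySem

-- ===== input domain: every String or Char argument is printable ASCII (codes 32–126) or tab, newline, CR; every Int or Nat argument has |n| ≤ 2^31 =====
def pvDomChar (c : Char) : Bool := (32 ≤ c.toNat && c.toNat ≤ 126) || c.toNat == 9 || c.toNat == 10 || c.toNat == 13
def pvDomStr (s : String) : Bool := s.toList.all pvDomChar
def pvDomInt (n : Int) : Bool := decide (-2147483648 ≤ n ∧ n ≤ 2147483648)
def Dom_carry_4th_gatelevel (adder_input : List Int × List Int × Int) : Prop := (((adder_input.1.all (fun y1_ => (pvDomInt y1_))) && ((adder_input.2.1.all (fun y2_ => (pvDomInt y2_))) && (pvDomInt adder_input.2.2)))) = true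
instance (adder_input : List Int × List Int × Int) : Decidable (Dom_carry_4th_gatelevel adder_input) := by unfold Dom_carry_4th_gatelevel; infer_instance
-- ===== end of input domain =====

-- B replaces the unrolled 4-term carry-lookahead expression by a single ripple-carry fold over the
-- four bit positions (same return value, including Python's non-boolean and/or results).

-- Python's 'x and y' / 'x or y' on ints (0 is the only falsy int): value-returning, not coerced
def pyAnd (x y : Int) : Int := if x = 0 then x else y
def pyOr (x y : Int) : Int := if x = 0 then y else x

-- ===== PORT A =====
def carry_4th_gatelevel (adder_input : List Int × List Int × Int) : Int :=
  let a := adder_input.1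
  let b := adder_input.2.1
  let c_in := adder_input.2.2
  let gen := (a.zip b).map (fun p => pyAnd p.1 p.2)
  let prop := (a.zip b).map (fun p => PySem.Int.bxor p.1 p.2)
  let g := fun (i : Int) => PySem.List.pyGetD gen i 0   -- total form; Pre_ keeps the index in range
  let p := fun (i : Int) => PySem.List.pyGetD prop i 0
  pyOr (pyOr (pyOr (pyOr (g 3)
    (pyAnd (p 3) (g 2)))
    (pyAnd (pyAnd (p 3) (p 2)) (g 1)))
    (pyAnd (pyAnd (pyAnd (p 3) (p 2)) (p 1)) (g 0)))
    (pyAnd (pyAnd (pyAnd (pyAnd (p 3) (p 2)) (p 1)) (p 0)) c_in)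

-- ===== PORT B =====
def carry_4th_gatelevel_alt (adder_input : List Int × List Int × Int) : Int :=
  let a := adder_input.1
  let b := adder_input.2.1
  let c_in := adder_input.2.2
  (PySem.List.pyRange 0 4 1).foldl
    (fun carry i =>
      pyOr (pyAnd (PySem.List.pyGetD a i 0) (PySem.List.pyGetD b i 0))
           (pyAnd (PySem.Int.bxor (PySem.List.pyGetD a i 0) (PySem.List.pyGetD b i 0)) carry))
    c_in

-- ===== PRECONDITION & SPEC =====
-- Pre_: both input lists need at least 4 bits, otherwise the Python A raises IndexError
def Pre_carry_4th_gatelevel (adder_input : List Int × List Int × Int) : Prop :=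
  4 ≤ adder_input.1.length ∧ 4 ≤ adder_input.2.1.length
instance (adder_input : List Int × List Int × Int) : Decidable (Pre_carry_4th_gatelevel adder_input) := by
  unfold Pre_carry_4th_gatelevel; infer_instance

def pvWitness_carry_4th_gatelevel : (List Int × List Int × Int) := ([1, 0, 1, 0], [0, 1, 1, 0], 1)

def Spec_carry_4th_gatelevel (adder_input : List Int × List Int × Int) (out : Int) : Prop := out = carry_4th_gatelevel_alt adder_input
instance (adder_input : List Int × List Int × Int) (out : Int) : Decidable (Spec_carry_4th_gatelevel adder_input out) := by unfold Spec_carry_4th_gatelevel; infer_instance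

-- ===== CLAIM (what is proved, stated in full; the proofs are below) =====
def Claim_equal_carry_4th_gatelevel : Prop := ∀ (adder_input : List Int × List Int × Int), Dom_carry_4th_gatelevel adder_input → Pre_carry_4th_gatelevel adder_input → Spec_carry_4th_gatelevel adder_input (carry_4th_gatelevel adder_input)

-- ===== LEMMAS AND PROOFS =====
lemma four_le_length_split (l : List Int) (h : 4 ≤ l.length) :
    ∃ x0 x1 x2 x3 t, l = x0 :: x1 :: x2 :: x3 :: t := by
  match l, h with
  | x0 :: x1 :: x2 :: x3 :: t, _ => exact ⟨x0, x1, x2, x3, t, rfl⟩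

-- ===== VERDICT (by name: the statement is the Claim_ definition above) =====
set_option maxHeartbeats 2000000 in
theorem carry_4th_gatelevel_spec : Claim_equal_carry_4th_gatelevel := by
  rintro ⟨a, b, c⟩ _ ⟨ha, hb⟩
  obtain ⟨a0, a1, a2, a3, ta, rfl⟩ := four_le_length_split a ha
  obtain ⟨b0, b1, b2, b3, tb, rfl⟩ := four_le_length_split b hb
  unfold Spec_carry_4th_gatelevel carry_4th_gatelevel carry_4th_gatelevel_alt
  have hr : PySem.List.pyRange 0 4 1 = [0, 1, 2, 3] := by decide
  have e0 : ∀ (x0 x1 x2 x3 : Int) (t : List Int), PySem.List.pyGetD (x0::x1::x2::x3::t) (0:Int) 0 = x0 := by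
    intro x0 x1 x2 x3 t; simp [pysem]
  have e1 : ∀ (x0 x1 x2 x3 : Int) (t : List Int), PySem.List.pyGetD (x0::x1::x2::x3::t) (1:Int) 0 = x1 := by
    intro x0 x1 x2 x3 t; simp [pysem]
  have e2 : ∀ (x0 x1 x2 x3 : Int) (t : List Int), PySem.List.pyGetD (x0::x1::x2::x3::t) (2:Int) 0 = x2 := by
    intro x0 x1 x2 x3 t; simp [pysem]
  have e3 : ∀ (x0 x1 x2 x3 : Int) (t : List Int), PySem.List.pyGetD (x0::x1::x2::x3::t) (3:Int) 0 = x3 := by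
    intro x0 x1 x2 x3 t; simp [pysem]
  simp only [hr, List.foldl_cons, List.foldl_nil, List.zip_cons_cons, List.map_cons, e0, e1, e2, e3]
  generalize PySem.Int.bxor a0 b0 = p0
  generalize PySem.Int.bxor a1 b1 = p1
  generalize PySem.Int.bxor a2 b2 = p2
  generalize PySem.Int.bxor a3 b3 = p3
  unfold pyAnd pyOr
  split_ifs <;> rfl
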